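-- pv_equiv track=rewrite | github.com/N-ikhil-thakur/Enigma | rotate.py | rotate_dict_keys
-- ===== SOURCE A (Python) =====
-- def rotate_dict_keys(dic , step):
--     keys = list(dic.keys())
--     values = list(dic.values())
--     newKeys = keys.copy()
--
--     for i in range(0 , len(keys)):
--         rot_step = abs(i+step) % len(keys)
--         if((i+step) >= 0):
--             newKeys[rot_step] = keys[i]
--         else:
--             newKeys[-rot_step] = keys[i]
--
--     return  dict(zip(newKeys,values))
-- ===== SOURCE B (Python) =====
-- def rotate_dict_keys(dic, step):
--     keys = list(dic.keys())
--     values = list(dic.values())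
--     n = len(keys)
--     if n == 0:
--         return {}
--     s = step % n
--     newKeys = keys[-s:] + keys[:-s]
--     return dict(zip(newKeys, values))
-- ===== Notes on version B (the rewrite author's own statement) =====
-- stated objective: simpler
-- what changed: A's per-element scatter loop (abs, %, and a sign case-split writing keys[i] to newKeys[(i+step)%n] one index at a time) is replaced by a single slice concatenation keys[-s:] + keys[:-s] with s = step % n (after an explicit empty-dict guard), then dict(zip(newKeys, values)) as before.
import Mathlib
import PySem

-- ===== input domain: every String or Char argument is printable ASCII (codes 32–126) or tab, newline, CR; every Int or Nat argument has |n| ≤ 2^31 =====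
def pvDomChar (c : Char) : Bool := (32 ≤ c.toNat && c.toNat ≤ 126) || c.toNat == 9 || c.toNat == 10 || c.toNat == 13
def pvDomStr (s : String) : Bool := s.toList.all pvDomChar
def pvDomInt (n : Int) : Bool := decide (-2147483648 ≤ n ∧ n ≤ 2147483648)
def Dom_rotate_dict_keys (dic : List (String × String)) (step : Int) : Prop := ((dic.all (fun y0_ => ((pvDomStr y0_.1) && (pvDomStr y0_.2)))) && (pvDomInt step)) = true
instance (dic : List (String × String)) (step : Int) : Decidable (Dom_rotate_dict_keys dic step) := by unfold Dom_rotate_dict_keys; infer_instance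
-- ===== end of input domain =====

-- B replaces A's element-by-element scatter loop (with its abs/%/sign case split) by a single
-- slice concatenation keys[-s:] + keys[:-s] with s = step % n; objective: simpler, same cost.

-- ===== PORT A =====
-- Python list-index assignment is ported with the total pySetD: every index this loop
-- computes is in range (rot_step ∈ [0, n) and -rot_step addresses n - rot_step), so it is exact here.
def rotate_dict_keys (dic : List (String × String)) (step : Int) : List (String × String) :=
  let keys := dic.map Prod.fst
  let values := dic.map Prod.snd
  let newKeys := (PySem.List.pyRange 0 (keys.length : Int) 1).foldl (fun nk i =>
      let rot_step : Int := PySem.Int.mod |i + step| (keys.length : Int)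
      if i + step ≥ 0 then PySem.List.pySetD nk rot_step (PySem.List.pyGetD keys i "")
      else PySem.List.pySetD nk (-rot_step) (PySem.List.pyGetD keys i "")) keys
  (PySem.Dict.ofList (newKeys.zip values)).items

-- ===== PORT B =====
def rotate_dict_keys_alt (dic : List (String × String)) (step : Int) : List (String × String) :=
  let keys := dic.map Prod.fst
  let values := dic.map Prod.snd
  let n : Int := keys.length
  if n = 0 then (PySem.Dict.empty (κ := String) (ν := String)).items
  else
    let s := PySem.Int.mod step n
    let newKeys := PySem.List.slice keys (some (-s)) none ++ PySem.List.slice keys none (some (-s))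
    (PySem.Dict.ofList (newKeys.zip values)).items

-- ===== PRECONDITION & SPEC =====
def Spec_rotate_dict_keys (dic : List (String × String)) (step : Int) (out : List (String × String)) : Prop := out = rotate_dict_keys_alt dic step
instance (dic : List (String × String)) (step : Int) (out : List (String × String)) : Decidable (Spec_rotate_dict_keys dic step out) := by unfold Spec_rotate_dict_keys; infer_instance

-- ===== CLAIM (what is proved, stated in full; the proofs are below) =====
def Claim_equal_rotate_dict_keys : Prop := ∀ (dic : List (String × String)) (step : Int), Dom_rotate_dict_keys dic step → Spec_rotate_dict_keys dic step (rotate_dict_keys dic step)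

-- ===== LEMMAS AND PROOFS =====

-- A's loop body (rot_step substituted); definitionally equal to the lambda in port A
def pvBodyA (keys : List String) (step : Int) : List String → Int → List String :=
  fun nk i =>
    if i + step ≥ 0 then
      PySem.List.pySetD nk (PySem.Int.mod |i + step| (keys.length : Int)) (PySem.List.pyGetD keys i "")
    else
      PySem.List.pySetD nk (-(PySem.Int.mod |i + step| (keys.length : Int))) (PySem.List.pyGetD keys i "")

-- n divides a - a % n
lemma pvDvdSubEmod (n a : Int) : n ∣ a - a % n := by
  have h := Int.mul_ediv_add_emod a n
  exact ⟨a / n, by linarith⟩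

-- x % n = r when r is in range and n divides x - r
lemma pvEmodEq (n x r : Int) (h0 : 0 ≤ r) (h1 : r < n) (h : n ∣ (x - r)) : x % n = r := by
  have h2 : (x - r) % n = 0 := Int.emod_eq_zero_of_dvd h
  have h3 : x % n = r % n := Int.emod_eq_emod_iff_emod_sub_eq_zero.mpr h2
  rw [h3, Int.emod_eq_of_lt h0 h1]

-- Python 'xs[-k] = v' for an in-range negative index writes at physical position len - k
lemma pvSetNeg {α : Type} (xs : List α) (k : Int) (v : α) (hk0 : 0 < k) (hk1 : k ≤ (xs.length : Int)) :
    PySem.List.pySetD xs (-k) v = xs.set (xs.length - k.toNat) v := by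
  have h1 : ¬ (0:Int) ≤ -k := by omega
  have h2 : -(xs.length : Int) ≤ -k := by omega
  unfold PySem.List.pySetD PySem.List.pySet? PySem.List.pyIdx?
  rw [if_neg h1, if_pos h2]
  simp

-- A's loop body normalized: both branches write keys[i] at physical index (i+step) % n
lemma pvBodyEq (keys : List String) (step : Int) (nk : List String) (i : Int)
    (hlen : nk.length = keys.length) (h0 : 0 ≤ i) (h1 : i < (keys.length : Int)) :
    pvBodyA keys step nk i =
    nk.set (((i + step) % (keys.length : Int)).toNat) (PySem.List.pyGetD keys i "") := by
  have hn : (0:Int) < (keys.length : Int) := lt_of_le_of_lt h0 h1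
  have hn0 : ((keys.length : Int)) ≠ 0 := ne_of_gt hn
  unfold pvBodyA
  simp only [PySem.Int.mod_eq_emod_of_pos hn]
  by_cases hpos : i + step ≥ 0
  · rw [if_pos hpos, abs_of_nonneg hpos,
      PySem.List.pySetD_of_nonneg _ _ (Int.emod_nonneg _ hn0)]
  · rw [if_neg hpos]
    have hpos' : i + step < 0 := lt_of_not_ge hpos
    rw [abs_of_neg hpos']
    have hr0 : 0 ≤ (-(i + step)) % (keys.length : Int) := Int.emod_nonneg _ hn0
    have hrlt : (-(i + step)) % (keys.length : Int) < (keys.length : Int) :=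
      Int.emod_lt_of_pos _ hn
    have hd1 : (keys.length : Int) ∣ (-(i + step)) - (-(i + step)) % (keys.length : Int) :=
      pvDvdSubEmod _ _
    rcases eq_or_lt_of_le hr0 with h0' | h0'
    · rw [← h0', neg_zero, PySem.List.pySetD_of_nonneg _ _ le_rfl]
      have hmz : (i + step) % (keys.length : Int) = 0 := by
        apply pvEmodEq _ _ _ le_rfl hn
        have he : (i + step) - 0 = -((-(i + step)) - (-(i + step)) % (keys.length : Int)) := by
          rw [← h0']; ring
        rw [he]; exact (dvd_neg).mpr hd1
      rw [hmz]
    · rw [pvSetNeg nk _ _ h0' (by omega)]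
      have hmv : (i + step) % (keys.length : Int) =
          (keys.length : Int) - (-(i + step)) % (keys.length : Int) := by
        apply pvEmodEq _ _ _ (by omega) (by omega)
        have he : (i + step) - ((keys.length : Int) - (-(i + step)) % (keys.length : Int)) =
            -((-(i + step)) - (-(i + step)) % (keys.length : Int)) - (keys.length : Int) := by ring
        rw [he]; exact dvd_sub ((dvd_neg).mpr hd1) dvd_rfl
      rw [hmv, hlen]
      congr 1
      omega

-- characterization of A's scatter loop after the first m iterations
lemma pvScatter (keys : List String) (step : Int) (m : Nat) (hm : m ≤ keys.length) :
    ((PySem.List.pyRange 0 (m : Int) 1).foldl (pvBodyA keys step) keys).length = keys.length ∧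
    ∀ j : Nat, j < keys.length →
      ((PySem.List.pyRange 0 (m : Int) 1).foldl (pvBodyA keys step) keys)[j]? =
      if ((((j : Int) - step) % (keys.length : Int)).toNat < m)
      then keys[((((j : Int) - step) % (keys.length : Int))).toNat]?
      else keys[j]? := by
  induction m with
  | zero =>
    simp only [Nat.cast_zero, PySem.List.pyRange_one_eq_nil le_rfl, List.foldl_nil]
    exact ⟨by simp, fun j hj => by rw [if_neg (by omega)]⟩
  | succ m ih =>
    obtain ⟨ihl, ihe⟩ := ih (Nat.le_of_succ_le hm)
    have hm2 : m < keys.length := hm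
    have hmn : (m : Int) < (keys.length : Int) := by exact_mod_cast hm2
    have hn : (0:Int) < (keys.length : Int) := lt_of_le_of_lt (Int.natCast_nonneg m) hmn
    have hn0 : ((keys.length : Int)) ≠ 0 := ne_of_gt hn
    have hrw : (((m + 1 : Nat)) : Int) = (m : Int) + 1 := by push_cast; ring
    rw [hrw, PySem.List.pyRange_one_succ_right (Int.natCast_nonneg m), List.foldl_append,
      List.foldl_cons, List.foldl_nil,
      pvBodyEq keys step _ (m : Int) ihl (Int.natCast_nonneg m) hmn]
    have hidx0 : 0 ≤ ((m : Int) + step) % (keys.length : Int) := Int.emod_nonneg _ hn0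
    have hidxlt : (((m : Int) + step) % (keys.length : Int)).toNat < keys.length := by
      have := Int.emod_lt_of_pos ((m : Int) + step) hn
      omega
    constructor
    · rw [List.length_set, ihl]
    · intro j hj
      rw [List.getElem?_set]
      by_cases hij : (((m : Int) + step) % (keys.length : Int)).toNat = j
      · subst hij
        rw [if_pos rfl, if_pos (by rw [ihl]; exact hidxlt)]
        have hd1 : (keys.length : Int) ∣ ((m : Int) + step) - ((m : Int) + step) % (keys.length : Int) :=
          pvDvdSubEmod _ _
        have hej : (((((m : Int) + step) % (keys.length : Int)).toNat : Int) - step) %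
            (keys.length : Int) = (m : Int) := by
          apply pvEmodEq _ _ _ (Int.natCast_nonneg m) hmn
          have he : ((((m : Int) + step) % (keys.length : Int)).toNat : Int) - step - (m : Int) =
              -(((m : Int) + step) - ((m : Int) + step) % (keys.length : Int)) := by
            rw [Int.toNat_of_nonneg hidx0]; ring
          rw [he]; exact (dvd_neg).mpr hd1
        rw [hej]
        simp only [Int.toNat_natCast]
        rw [if_pos (Nat.lt_succ_self m)]
        rw [PySem.List.pyGetD_natCast, List.getElem?_eq_getElem hm2, List.getD_eq_getElem keys "" hm2]
      · rw [if_neg hij, ihe j hj]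
        have hne : ((((j : Int) - step) % (keys.length : Int)).toNat) ≠ m := by
          intro hEq
          apply hij
          have h0' : 0 ≤ ((j : Int) - step) % (keys.length : Int) := Int.emod_nonneg _ hn0
          have hejI : ((j : Int) - step) % (keys.length : Int) = (m : Int) := by omega
          have hd1 : (keys.length : Int) ∣ ((j : Int) - step) - ((j : Int) - step) % (keys.length : Int) :=
            pvDvdSubEmod _ _
          rw [hejI] at hd1
          have hmj : ((m : Int) + step) % (keys.length : Int) = (j : Int) := by
            apply pvEmodEq _ _ _ (Int.natCast_nonneg j) (by exact_mod_cast hj)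
            have he : (m : Int) + step - (j : Int) = -((j : Int) - step - (m : Int)) := by ring
            rw [he]; exact (dvd_neg).mpr hd1
          rw [hmj]
          omega
        by_cases hcond : ((((j : Int) - step) % (keys.length : Int)).toNat) < m
        · rw [if_pos hcond, if_pos (by omega)]
        · rw [if_neg hcond, if_neg (by omega)]

-- characterization of B's slice concatenation
lemma pvRotChar (keys : List String) (step : Int) (hk : keys ≠ []) :
    (PySem.List.slice keys (some (-(PySem.Int.mod step (keys.length : Int)))) none ++
     PySem.List.slice keys none (some (-(PySem.Int.mod step (keys.length : Int))))).length = keys.length ∧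
    ∀ j : Nat, j < keys.length →
      (PySem.List.slice keys (some (-(PySem.Int.mod step (keys.length : Int)))) none ++
       PySem.List.slice keys none (some (-(PySem.Int.mod step (keys.length : Int)))))[j]? =
      keys[((((j : Int) - step) % (keys.length : Int))).toNat]? := by
  have hl0 : 0 < keys.length := List.length_pos_iff_ne_nil.mpr hk
  have hn : (0:Int) < (keys.length : Int) := by exact_mod_cast hl0
  have hn0 : ((keys.length : Int)) ≠ 0 := ne_of_gt hn
  rw [PySem.Int.mod_eq_emod_of_pos hn]
  have hs0 : 0 ≤ step % (keys.length : Int) := Int.emod_nonneg _ hn0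
  have hslt : step % (keys.length : Int) < (keys.length : Int) := Int.emod_lt_of_pos _ hn
  have hds : (keys.length : Int) ∣ step - step % (keys.length : Int) := pvDvdSubEmod _ _
  by_cases h0 : step % (keys.length : Int) = 0
  · rw [h0, neg_zero, PySem.List.slice_from keys le_rfl, PySem.List.slice_to keys le_rfl]
    simp only [Int.toNat_zero, List.drop_zero, List.take_zero, List.append_nil]
    refine ⟨by simp, fun j hj => ?_⟩
    have hej : ((j : Int) - step) % (keys.length : Int) = (j : Int) := by
      apply pvEmodEq _ _ _ (Int.natCast_nonneg j) (by exact_mod_cast hj)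
      have he : (j : Int) - step - (j : Int) = -(step - step % (keys.length : Int)) := by
        rw [h0]; ring
      rw [he]; exact (dvd_neg).mpr hds
    rw [hej, Int.toNat_natCast]
  · have hs1 : 0 < step % (keys.length : Int) := lt_of_le_of_ne hs0 (Ne.symm h0)
    have hneg : -(step % (keys.length : Int)) = -(((step % (keys.length : Int)).toNat : Nat) : Int) := by
      omega
    rw [hneg, PySem.List.slice_from_neg_natCast keys _ (by omega),
      PySem.List.slice_to_neg_natCast keys _ (by omega)]
    have hkk : (step % (keys.length : Int)).toNat < keys.length := by omega
    have hlen_drop : (List.drop (keys.length - (step % (keys.length : Int)).toNat) keys).length =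
        (step % (keys.length : Int)).toNat := by
      rw [List.length_drop]; omega
    constructor
    · rw [List.length_append, hlen_drop, List.length_take]; omega
    · intro j hj
      by_cases hjk : j < (step % (keys.length : Int)).toNat
      · rw [List.getElem?_append_left (by rw [hlen_drop]; exact hjk), List.getElem?_drop]
        have hej : ((j : Int) - step) % (keys.length : Int) =
            (keys.length : Int) + (j : Int) - step % (keys.length : Int) := by
          apply pvEmodEq _ _ _ (by omega) (by omega)
          have he : (j : Int) - step - ((keys.length : Int) + (j : Int) - step % (keys.length : Int)) =
              -(step - step % (keys.length : Int)) - (keys.length : Int) := by ring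
          rw [he]; exact dvd_sub ((dvd_neg).mpr hds) dvd_rfl
        rw [hej]
        congr 1
        omega
      · rw [List.getElem?_append_right (by rw [hlen_drop]; omega), hlen_drop, List.getElem?_take,
          if_pos (by omega)]
        have hej : ((j : Int) - step) % (keys.length : Int) = (j : Int) - step % (keys.length : Int) := by
          apply pvEmodEq _ _ _ (by omega) (by omega)
          have he : (j : Int) - step - ((j : Int) - step % (keys.length : Int)) =
              -(step - step % (keys.length : Int)) := by ring
          rw [he]; exact (dvd_neg).mpr hds
        rw [hej]
        congr 1
        omega

-- ===== VERDICT (by name: the statement is the Claim_ definition above) =====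
theorem rotate_dict_keys_spec : Claim_equal_rotate_dict_keys := by
  intro dic step _
  unfold Spec_rotate_dict_keys
  by_cases hd : dic = []
  · subst hd; rfl
  · have hk : dic.map Prod.fst ≠ [] := by simpa using hd
    have hl0 : 0 < (dic.map Prod.fst).length := List.length_pos_iff_ne_nil.mpr hk
    have hnpos : (0:Int) < ((dic.map Prod.fst).length : Int) := by exact_mod_cast hl0
    have hn0 : (((dic.map Prod.fst).length : Int)) ≠ 0 := ne_of_gt hnpos
    have hnew :
        ((PySem.List.pyRange 0 ((dic.map Prod.fst).length : Int) 1).foldl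
            (pvBodyA (dic.map Prod.fst) step) (dic.map Prod.fst)) =
        (PySem.List.slice (dic.map Prod.fst)
            (some (-(PySem.Int.mod step ((dic.map Prod.fst).length : Int)))) none ++
         PySem.List.slice (dic.map Prod.fst) none
            (some (-(PySem.Int.mod step ((dic.map Prod.fst).length : Int))))) := by
      obtain ⟨hAl, hAe⟩ := pvScatter (dic.map Prod.fst) step (dic.map Prod.fst).length le_rfl
      obtain ⟨hBl, hBe⟩ := pvRotChar (dic.map Prod.fst) step hk
      apply List.ext_getElem?
      intro j
      by_cases hj : j < (dic.map Prod.fst).length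
      · rw [hAe j hj, hBe j hj, if_pos]
        have h1 := Int.emod_lt_of_pos ((j : Int) - step) hnpos
        have h2 := Int.emod_nonneg ((j : Int) - step) hn0
        omega
      · rw [List.getElem?_eq_none (by rw [hAl]; omega),
          List.getElem?_eq_none (by rw [hBl]; omega)]
    have halt : rotate_dict_keys_alt dic step =
        (PySem.Dict.ofList
          ((PySem.List.slice (dic.map Prod.fst)
              (some (-(PySem.Int.mod step ((dic.map Prod.fst).length : Int)))) none ++
            PySem.List.slice (dic.map Prod.fst) none
              (some (-(PySem.Int.mod step ((dic.map Prod.fst).length : Int))))).zip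
            (dic.map Prod.snd))).items := by
      simp only [rotate_dict_keys_alt]
      rw [if_neg hn0]
    rw [halt]
    exact congrArg
      (fun l => (PySem.Dict.ofList (l.zip (dic.map Prod.snd))).items) hnew
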